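-- pv_equiv track=rewrite | github.com/FlipperMaker/flippermaker.github.io | Tools/test_TouchTunes.py | encode_touchtunes
-- ===== SOURCE A (Python) =====
-- def encode_touchtunes(command, pin=0x00):
--     frame = 0x5D
--
--     for bit in range(8):
--         frame <<= 1
--         if pin&(1<<bit):
--             frame |= 1
--     frame <<= 16
--     frame |= (command << 8)
--     frame |= (command ^ 0xFF)
--     ook = ""
--     for i in range(8+8+16):
--         if (frame & 0x80000000):
--             ook +="1000"
--             frame <<=1
--         else:
--             ook += "10"
--             frame <<=1
--     return "1"*16 + "0"*8 + ook + "1000"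
-- ===== SOURCE B (Python) =====
-- # Table-driven re-implementation: a 256-entry per-byte OOK table built by doubling,
-- # plus a branch-free butterfly bit-reversal of the pin byte; frame is emitted as
-- # four byte lookups instead of a 32-step bit walk.
--
-- _OOK = ['10', '1000']
-- for _ in range(3):
--     _OOK = [hi + lo for hi in _OOK for lo in _OOK]
--
--
-- def _rev8(b):
--     b &= 0xFF
--     b = ((b & 0xF0) >> 4) | ((b & 0x0F) << 4)
--     b = ((b & 0xCC) >> 2) | ((b & 0x33) << 2)
--     b = ((b & 0xAA) >> 1) | ((b & 0x55) << 1)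
--     return b
--
--
-- def encode_touchtunes(command, pin=0x00):
--     frame = (((0x5D00 | _rev8(pin)) << 16) | (command << 8) | (command ^ 0xFF)) & 0xFFFFFFFF
--     body = ''.join(_OOK[(frame >> s) & 0xFF] for s in (24, 16, 8, 0))
--     return '1' * 16 + '0' * 8 + body + '1000'
-- ===== Notes on version B (the rewrite author's own statement) =====
-- stated objective: alternative
-- what changed: Replaces A's per-bit loops entirely: the pin byte is reversed by a branch-free butterfly (three mask-and-shift swaps instead of an 8-step shift/or loop), and the 32-step OOK bit walk is replaced by a 256-entry per-byte lookup table built once by doubling, the body being four table lookups on the frame's bytes.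
import Mathlib
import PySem

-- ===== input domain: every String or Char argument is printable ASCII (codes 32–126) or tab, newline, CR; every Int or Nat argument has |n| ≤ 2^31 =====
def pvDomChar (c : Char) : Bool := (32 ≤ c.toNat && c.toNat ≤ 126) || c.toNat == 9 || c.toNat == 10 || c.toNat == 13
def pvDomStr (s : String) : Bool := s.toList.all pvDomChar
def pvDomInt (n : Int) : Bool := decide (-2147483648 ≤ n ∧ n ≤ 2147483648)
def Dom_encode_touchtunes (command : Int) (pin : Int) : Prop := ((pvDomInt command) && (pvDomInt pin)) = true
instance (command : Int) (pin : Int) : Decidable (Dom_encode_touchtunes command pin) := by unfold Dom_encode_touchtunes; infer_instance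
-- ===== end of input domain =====

-- B replaces A's two bit-at-a-time loops by a 256-entry per-byte OOK lookup table (built once
-- by squaring/doubling) and a butterfly bit-reversal of the pin byte; objective: alternative.

-- ===== PORT A =====
-- literal transliteration of A: the pin loop, the shift/or frame construction, the OOK loop
def encode_touchtunes (command : Int) (pin : Int) : String :=
  let frame : Int := 0x5D
  let frame : Int := (List.range 8).foldl (fun (frame : Int) (bit : Nat) =>
    let frame := frame <<< (1:Nat)
    if PySem.Int.band pin ((1 : Int) <<< bit) ≠ 0 then PySem.Int.bor frame 1 else frame) frame
  let frame := frame <<< (16:Nat)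
  let frame := PySem.Int.bor frame (command <<< (8:Nat))
  let frame := PySem.Int.bor frame (PySem.Int.bxor command 0xFF)
  let res := (List.range (8+8+16)).foldl (fun (st : List Char × Int) _ =>
    if PySem.Int.band st.2 0x80000000 ≠ 0 then (st.1 ++ ['1','0','0','0'], st.2 <<< (1:Nat))
    else (st.1 ++ ['1','0'], st.2 <<< (1:Nat))) (([] : List Char), frame)
  String.mk (List.replicate 16 '1' ++ List.replicate 8 '0' ++ res.1 ++ ['1','0','0','0'])

-- ===== PORT B =====
-- Source B's module-level table: the per-byte OOK strings, built by doubling from the 1-bit table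
def pvOOK : List (List Char) :=
  (List.range 3).foldl (fun T _ => (T.map (fun hi => T.map (fun lo => hi ++ lo))).flatten)
    [['1','0'], ['1','0','0','0']]

-- Source B's _rev8: butterfly bit-reversal of a byte
def pvRev8 (b : Int) : Int :=
  let b := PySem.Int.band b 0xFF
  let b := PySem.Int.bor ((PySem.Int.band b 0xF0) >>> (4:Nat)) ((PySem.Int.band b 0x0F) <<< (4:Nat))
  let b := PySem.Int.bor ((PySem.Int.band b 0xCC) >>> (2:Nat)) ((PySem.Int.band b 0x33) <<< (2:Nat))
  PySem.Int.bor ((PySem.Int.band b 0xAA) >>> (1:Nat)) ((PySem.Int.band b 0x55) <<< (1:Nat))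

def encode_touchtunes_alt (command : Int) (pin : Int) : String :=
  let frame : Int := PySem.Int.band
    (PySem.Int.bor (PySem.Int.bor ((PySem.Int.bor 0x5D00 (pvRev8 pin)) <<< (16:Nat)) (command <<< (8:Nat)))
      (PySem.Int.bxor command 0xFF)) 0xFFFFFFFF
  let body := ([24, 16, 8, 0] : List Nat).foldl
    (fun (acc : List Char) (s : Nat) => acc ++ pvOOK.getD (PySem.Int.band (frame >>> s) 0xFF).toNat []) []
  String.mk (List.replicate 16 '1' ++ List.replicate 8 '0' ++ body ++ ['1','0','0','0'])

-- ===== PRECONDITION & SPEC =====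
def Spec_encode_touchtunes (command : Int) (pin : Int) (out : String) : Prop := out = encode_touchtunes_alt command pin
instance (command : Int) (pin : Int) (out : String) : Decidable (Spec_encode_touchtunes command pin out) := by unfold Spec_encode_touchtunes; infer_instance

-- ===== CLAIM (what is proved, stated in full; the proofs are below) =====
def Claim_equal_encode_touchtunes : Prop := ∀ (command : Int) (pin : Int), Dom_encode_touchtunes command pin → Spec_encode_touchtunes command pin (encode_touchtunes command pin)

-- ===== LEMMAS AND PROOFS =====

-- a & 2^i is nonzero iff floor(a / 2^i) is odd (Python bit test), for every Int a
theorem pv_band_pow (a : Int) (i : Nat) :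
    (PySem.Int.band a ((2:Int)^i) ≠ 0) ↔ a / 2^i % 2 = 1 := by
  have h2n : ((2:Int)^i) = ((2^i : Nat) : Int) := by push_cast; ring
  have hpow : (0:Nat) < 2^i := Nat.two_pow_pos i
  by_cases ha : 0 ≤ a
  · obtain ⟨m, rfl⟩ := Int.eq_ofNat_of_zero_le ha
    rw [h2n, PySem.Int.band_natCast, Nat.and_two_pow]
    have hcast : ((m:Int)) / ((2^i:Nat):Int) % 2 = ((m / 2^i % 2 : Nat) : Int) := by
      rw [← Int.natCast_div]
      rw [show ((2:Int)) = ((2:Nat):Int) by norm_num, ← Int.natCast_mod]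
    rw [hcast]
    have htb : m.testBit i = decide (m / 2^i % 2 = 1) := Nat.testBit_eq_decide_div_mod_eq
    rcases h : m.testBit i with _ | _ <;> rw [h] at htb
    · have h0 : m / 2^i % 2 = 0 := by
        have := of_decide_eq_false htb.symm; omega
      norm_num [h0]
    · have h1 : m / 2^i % 2 = 1 := of_decide_eq_true htb.symm
      norm_num [h1]
  · set m : Nat := (-a - 1).toNat with hm
    have ham : a = -(m:Int) - 1 := by omega
    have hband : PySem.Int.band a ((2:Int)^i)
        = ((2^i - ((m.testBit i).toNat * 2^i) : Nat) : Int) := by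
      rw [PySem.Int.band]
      rw [if_neg ha, if_pos (by positivity : (0:Int) ≤ 2^i)]
      rw [h2n, Int.toNat_natCast, ← hm, Nat.and_comm, Nat.and_two_pow]
    set q : Nat := m / 2^i with hq
    set r : Nat := m % 2^i with hr
    have hrlt : r < 2^i := Nat.mod_lt _ hpow
    have hqr : m = q * 2^i + r := (Nat.div_add_mod' m (2^i)).symm
    have hdiv : a / 2^i = -(q:Int) - 1 := by
      have hrepr : a = (((2^i:Nat):Int) - (r:Int) - 1) + ((2:Int)^i) * (-(q:Int) - 1) := by
        rw [ham, h2n]; push_cast [hqr]; ring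
      rw [hrepr, Int.add_mul_ediv_left _ _ (by positivity : ((2:Int)^i) ≠ 0), h2n,
        Int.ediv_eq_zero_of_lt (by push_cast; omega) (by push_cast; omega)]
      ring
    have htb : m.testBit i = decide (q % 2 = 1) := Nat.testBit_eq_decide_div_mod_eq
    rw [hband, hdiv]
    rcases h : m.testBit i with _ | _ <;> rw [h] at htb
    · have h0 : q % 2 = 0 := by have := htb.symm; simp at this; omega
      simp only [Bool.toNat_false, Nat.zero_mul, Nat.sub_zero]
      constructor
      · intro _; omega
      · intro _; push_cast; positivity
    · have h1 : q % 2 = 1 := by simpa using htb.symm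
      simp only [Bool.toNat_true, Nat.one_mul, Nat.sub_self]
      constructor
      · intro hc; exact absurd rfl hc
      · intro hc; exfalso; omega

-- a & (2^n - 1) = a %(euclid) 2^n, for every Int a
theorem pv_band_mask (a : Int) (n : Nat) :
    PySem.Int.band a ((2:Int)^n - 1) = a % (2:Int)^n := by
  have hpow : (0:Nat) < 2^n := Nat.two_pow_pos n
  have h2n : ((2:Int)^n - 1) = (((2^n - 1 : Nat)) : Int) := by
    push_cast [Nat.cast_sub (Nat.one_le_two_pow)]; ring
  by_cases ha : 0 ≤ a
  · obtain ⟨m, rfl⟩ := Int.eq_ofNat_of_zero_le ha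
    rw [h2n, PySem.Int.band_natCast, Nat.and_two_pow_sub_one_eq_mod]
    rw [show ((2:Int)^n) = ((2^n : Nat) : Int) by push_cast; ring, ← Int.natCast_mod]
  · set m : Nat := (-a - 1).toNat with hm
    have ham : a = -(m:Int) - 1 := by omega
    have hband : PySem.Int.band a ((2:Int)^n - 1)
        = (((2^n - 1) - (m % 2^n) : Nat) : Int) := by
      rw [PySem.Int.band]
      rw [if_neg ha, if_pos (by rw [h2n]; exact Int.natCast_nonneg _)]
      rw [h2n, Int.toNat_natCast, ← hm, Nat.and_comm, Nat.and_two_pow_sub_one_eq_mod]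
    set q : Nat := m / 2^n with hq
    set r : Nat := m % 2^n with hr
    have hrlt : r < 2^n := Nat.mod_lt _ hpow
    have hqr : m = q * 2^n + r := (Nat.div_add_mod' m (2^n)).symm
    have hmod : a % (2:Int)^n = (((2^n:Nat)):Int) - (r:Int) - 1 := by
      have hrepr : a = ((((2^n:Nat)):Int) - (r:Int) - 1) + ((2:Int)^n) * (-(q:Int) - 1) := by
        rw [ham]; push_cast [hqr]; ring
      rw [hrepr, Int.add_mul_emod_self_left,
        Int.emod_eq_of_lt (by push_cast; omega) (by push_cast; omega)]
    rw [hband, hmod]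
    push_cast [Nat.cast_sub (by omega : r ≤ 2^n - 1), Nat.cast_sub (Nat.one_le_two_pow)]
    ring

-- low bits of a % 2^n agree with a's Python bits
theorem pv_testBit_mod (a : Int) (n j : Nat) (h : j < n) :
    ((a % (2:Int)^n).toNat.testBit j) ↔ a / 2^j % 2 = 1 := by
  have hpos : (0:Int) < 2^n := by positivity
  have hnn : (0:Int) ≤ a % 2^n := Int.emod_nonneg a (ne_of_gt hpos)
  have key : (a % (2:Int)^n) / 2^j % 2 = a / 2^j % 2 := by
    have hsplit : a % (2:Int)^n = a + 2^j * (2 * (-((2:Int)^(n-j-1) * (a / 2^n)))) := by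
      rw [Int.emod_def]
      rw [show ((2:Int)^n) = 2^j * (2 * 2^(n-j-1)) by
        rw [show 2 * (2:Int)^(n-j-1) = 2^(n-j) by rw [← pow_succ']; congr 1; omega,
          ← pow_add]; congr 1; omega]
      ring
    rw [hsplit, Int.add_mul_ediv_left _ _ (by positivity : ((2:Int)^j) ≠ 0),
      Int.add_mul_emod_self_left]
  set t : Nat := (a % (2:Int)^n).toNat with htdef
  have tcast : (t : Int) = a % 2^n := Int.toNat_of_nonneg hnn
  have hcast : ((t / 2^j % 2 : Nat) : Int) = a / 2^j % 2 := by
    calc ((t / 2^j % 2 :Nat):Int) = ((t/2^j:Nat):Int) % ((2:Nat):Int) := Int.natCast_mod _ _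
      _ = ((t:Int) / ((2^j:Nat):Int)) % 2 := by rw [Int.natCast_div]; norm_num
      _ = (a % 2^n) / 2^j % 2 := by rw [tcast]; norm_num [Nat.cast_pow]
      _ = a / 2^j % 2 := key
  rw [show t.testBit j = decide (t / 2^j % 2 = 1) from Nat.testBit_eq_decide_div_mod_eq,
    decide_eq_true_iff]
  set u : Nat := t / 2^j % 2
  set v : Int := a / 2^j % 2
  omega

-- shifting left moves the tested bit down
theorem pv_band_shift (G : Int) (i : Nat) (h : 1 ≤ i) :
    (PySem.Int.band (G <<< (1:Nat)) ((2:Int)^i) ≠ 0) ↔ (PySem.Int.band G ((2:Int)^(i-1)) ≠ 0) := by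
  rw [pv_band_pow, pv_band_pow]
  rw [show G <<< (1:Nat) = 2 * G from by rw [Int.shiftLeft_eq]; ring,
    show ((2:Int)^i) = 2 * 2^(i-1) from by rw [← pow_succ']; congr 1; omega,
    Int.mul_ediv_mul_of_pos _ _ (by norm_num : (0:Int) < 2)]

-- pin-loop table, checked for all 256 byte values
theorem pv_pin_table : ∀ p : Nat, p < 256 →
    (List.range 8).foldl (fun frame bit =>
      if p.testBit bit then PySem.Int.bor (frame <<< (1:Nat)) 1 else frame <<< (1:Nat)) 0x5D
    = PySem.Int.bor 0x5D00 (pvRev8 (p : Int)) := by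
  set_option maxRecDepth 8192 in decide

-- A's pin loop equals 0x5D00 | butterfly-reversal of pin's low byte
theorem pv_pin_loop (pin : Int) :
    (List.range 8).foldl (fun (frame : Int) (bit : Nat) =>
      if PySem.Int.band pin ((1 : Int) <<< bit) ≠ 0 then PySem.Int.bor (frame <<< (1:Nat)) 1
      else frame <<< (1:Nat)) 0x5D
    = PySem.Int.bor 0x5D00 (pvRev8 pin) := by
  have hmask : PySem.Int.band pin 0xFF = pin % 2^8 := by
    have h := pv_band_mask pin 8
    norm_num at h ⊢
    exact h
  set p : Nat := (PySem.Int.band pin 0xFF).toNat with hp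
  have hplt : p < 256 := by
    have h1 : (0:Int) ≤ pin % 2^8 := Int.emod_nonneg pin (by positivity)
    have h2 : pin % 2^8 < 2^8 := Int.emod_lt_of_pos pin (by positivity)
    rw [hp, hmask]
    omega
  have hpc : ((p:Int)) = pin % 2^8 := by
    rw [hp, hmask]
    exact Int.toNat_of_nonneg (Int.emod_nonneg pin (by positivity))
  have hband_p : PySem.Int.band ((p:Int)) 0xFF = PySem.Int.band pin 0xFF := by
    rw [show ((0xFF:Int)) = ((255:Nat):Int) from by norm_num, PySem.Int.band_natCast]
    have h1 : p &&& 255 = p := by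
      have h := Nat.and_two_pow_sub_one_eq_mod p 8
      norm_num at h
      rw [h, Nat.mod_eq_of_lt hplt]
    rw [h1]
    rw [show PySem.Int.band pin (((255:Nat):Int)) = PySem.Int.band pin 0xFF from by norm_num,
      hmask]
    exact hpc
  have hrev : pvRev8 pin = pvRev8 (p : Int) := by
    unfold pvRev8
    rw [← hband_p]
  have hbit : ∀ bit : Nat, bit < 8 →
      ((PySem.Int.band pin ((1:Int) <<< bit) ≠ 0) ↔ (p.testBit bit = true)) := by
    intro bit hb
    rw [show (1:Int) <<< bit = 2^bit from by rw [Int.shiftLeft_eq]; ring, pv_band_pow,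
      hp, hmask]
    exact ⟨fun h => (pv_testBit_mod pin 8 bit hb).mpr h,
      fun h => (pv_testBit_mod pin 8 bit hb).mp h⟩
  have h0 := hbit 0 (by norm_num); have h1 := hbit 1 (by norm_num)
  have h2 := hbit 2 (by norm_num); have h3 := hbit 3 (by norm_num)
  have h4 := hbit 4 (by norm_num); have h5 := hbit 5 (by norm_num)
  have h6 := hbit 6 (by norm_num); have h7 := hbit 7 (by norm_num)
  have htab := pv_pin_table p hplt
  have hrange : List.range 8 = ([0,1,2,3,4,5,6,7] : List Nat) := by decide
  rw [hrange] at htab ⊢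
  simp only [List.foldl_cons, List.foldl_nil] at htab ⊢
  simp only [h0, h1, h2, h3, h4, h5, h6, h7]
  rw [hrev]
  exact htab

def pvSpecBody : Nat → Int → List Char
  | 0, _ => []
  | (j+1), G =>
    (if PySem.Int.band G 0x80000000 ≠ 0 then (['1','0','0','0'] : List Char) else ['1','0'])
      ++ pvSpecBody j (G <<< (1:Nat))

theorem pv_ook_fold (n : Nat) (init : List Char × Int) :
    (List.range n).foldl (fun (st : List Char × Int) _ =>
      if PySem.Int.band st.2 0x80000000 ≠ 0 then (st.1 ++ ['1','0','0','0'], st.2 <<< (1:Nat))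
      else (st.1 ++ ['1','0'], st.2 <<< (1:Nat))) init
    = (fun (st : List Char × Int) =>
      if PySem.Int.band st.2 0x80000000 ≠ 0 then (st.1 ++ ['1','0','0','0'], st.2 <<< (1:Nat))
      else (st.1 ++ ['1','0'], st.2 <<< (1:Nat)))^[n] init := by
  induction n with
  | zero => rfl
  | succ k ih =>
    rw [List.range_succ, List.foldl_append, ih, List.foldl_cons, List.foldl_nil,
      Function.iterate_succ_apply']

theorem pv_iterate_ook (j : Nat) (acc : List Char) (G : Int) :
    (fun (st : List Char × Int) =>
      if PySem.Int.band st.2 0x80000000 ≠ 0 then (st.1 ++ ['1','0','0','0'], st.2 <<< (1:Nat))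
      else (st.1 ++ ['1','0'], st.2 <<< (1:Nat)))^[j] (acc, G)
    = (acc ++ pvSpecBody j G, G <<< j) := by
  induction j generalizing acc G with
  | zero => simp [pvSpecBody, Int.shiftLeft_eq]
  | succ k ih =>
    rw [Function.iterate_succ_apply]
    dsimp only
    by_cases hb : PySem.Int.band G 0x80000000 ≠ 0
    · rw [if_pos hb, ih, pvSpecBody, if_pos hb, List.append_assoc]
      refine Prod.ext rfl ?_
      simp [Int.shiftLeft_eq, pow_succ]
      ring
    · rw [if_neg hb, ih, pvSpecBody, if_neg hb, List.append_assoc]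
      refine Prod.ext rfl ?_
      simp [Int.shiftLeft_eq, pow_succ]
      ring

theorem pv_specBody_bits (j : Nat) : ∀ G : Int, j ≤ 32 →
    pvSpecBody j G = ((List.range j).map (fun t =>
      if PySem.Int.band G ((2:Int)^(31 - t)) ≠ 0 then (['1','0','0','0'] : List Char) else ['1','0'])).flatten := by
  induction j with
  | zero => intro G _; simp [pvSpecBody]
  | succ k ih =>
    intro G hj
    rw [pvSpecBody, List.range_succ_eq_map, List.map_cons, List.map_map, List.flatten_cons,
      ih (G <<< (1:Nat)) (by omega)]
    congr 1
    congr 1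
    apply List.map_congr_left
    intro t ht
    rw [List.mem_range] at ht
    have hsh := pv_band_shift G (31 - t) (by omega)
    rw [show (31 - t - 1) = 31 - Nat.succ t from by omega] at hsh
    simp only [Function.comp_apply]
    exact if_congr hsh rfl rfl

-- MSB-first OOK rendering of the low w bits of a Nat (proof-side characterisation)
def pvBitsMSB (w : Nat) (n : Nat) : List Char :=
  ((List.range w).map (fun t =>
    if n.testBit (w - 1 - t) then (['1','0','0','0'] : List Char) else ['1','0'])).flatten

-- A's per-bit body equals the MSB rendering of the masked frame
theorem pv_body_bits (F : Int) :
    ((List.range 32).map (fun t =>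
      if PySem.Int.band F ((2:Int)^(31 - t)) ≠ 0 then (['1','0','0','0'] : List Char) else ['1','0'])).flatten
    = pvBitsMSB 32 (PySem.Int.band F 0xFFFFFFFF).toNat := by
  rw [pvBitsMSB]
  congr 1
  apply List.map_congr_left
  intro t ht
  rw [List.mem_range] at ht
  have hm : PySem.Int.band F 0xFFFFFFFF = F % 2^32 := by
    have h := pv_band_mask F 32
    norm_num at h ⊢
    exact h
  have hb : ((PySem.Int.band F 0xFFFFFFFF).toNat.testBit (32 - 1 - t) = true)
      ↔ PySem.Int.band F ((2:Int)^(31 - t)) ≠ 0 := by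
    rw [hm, show (32 - 1 - t) = 31 - t from by omega, pv_band_pow]
    exact pv_testBit_mod F 32 (31 - t) (by omega)
  cases h : (PySem.Int.band F 0xFFFFFFFF).toNat.testBit (32 - 1 - t) with
  | false =>
    have hnb : ¬ (PySem.Int.band F ((2:Int)^(31 - t)) ≠ 0) := by
      rw [← hb, h]; simp
    simp [hnb]
  | true =>
    have hyb : PySem.Int.band F ((2:Int)^(31 - t)) ≠ 0 := hb.mp h
    simp [hyb]

-- splitting an MSB rendering at a bit boundary
theorem pv_bitsMSB_split (v w hi lo : Nat) (hlo : lo < 2^w) :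
    pvBitsMSB (v + w) (hi * 2^w + lo) = pvBitsMSB v hi ++ pvBitsMSB w lo := by
  unfold pvBitsMSB
  rw [List.range_add, List.map_append, List.flatten_append, List.map_map]
  congr 1
  · apply congrArg
    apply List.map_congr_left
    intro t ht
    rw [List.mem_range] at ht
    have hdiv : (hi * 2^w + lo) / 2^w = hi := by
      rw [mul_comm, Nat.mul_add_div (Nat.two_pow_pos w), Nat.div_eq_of_lt hlo, Nat.add_zero]
    have hidx : v + w - 1 - t = (v - 1 - t) + w := by omega
    rw [hidx, ← Nat.testBit_div_two_pow, hdiv]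
  · apply congrArg
    apply List.map_congr_left
    intro t ht
    rw [List.mem_range] at ht
    have hmod : (hi * 2^w + lo) % 2^w = lo := by
      rw [mul_comm, Nat.mul_add_mod, Nat.mod_eq_of_lt hlo]
    have hidx : v + w - 1 - (v + t) = w - 1 - t := by omega
    simp only [Function.comp_apply]
    rw [hidx, show (hi * 2^w + lo).testBit (w - 1 - t)
        = ((hi * 2^w + lo) % 2^w).testBit (w - 1 - t) from by
      rw [Nat.testBit_mod_two_pow]
      simp [show w - 1 - t < w from by omega], hmod]

-- a 32-bit MSB rendering is the concatenation of its four bytes' renderings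
theorem pv_bitsMSB_bytes (n : Nat) (_hn : n < 2^32) :
    pvBitsMSB 32 n = pvBitsMSB 8 (n / 2^24) ++ pvBitsMSB 8 (n / 2^16 % 256)
      ++ pvBitsMSB 8 (n / 2^8 % 256) ++ pvBitsMSB 8 (n % 256) := by
  have e1 : n = (n / 2^24) * 2^24 + n % 2^24 := by omega
  have h1 : n % 2^24 < 2^24 := by omega
  have e2 : n % 2^24 = (n / 2^16 % 256) * 2^16 + n % 2^16 := by omega
  have h2 : n % 2^16 < 2^16 := by omega
  have e3 : n % 2^16 = (n / 2^8 % 256) * 2^8 + n % 2^8 := by omega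
  have h3 : n % 2^8 < 2^8 := by omega
  calc pvBitsMSB 32 n = pvBitsMSB (8 + 24) ((n / 2^24) * 2^24 + n % 2^24) := by rw [← e1]
    _ = pvBitsMSB 8 (n / 2^24) ++ pvBitsMSB 24 (n % 2^24) := pv_bitsMSB_split 8 24 _ _ h1
    _ = pvBitsMSB 8 (n / 2^24) ++ pvBitsMSB (8 + 16) ((n / 2^16 % 256) * 2^16 + n % 2^16) := by
        rw [← e2]
    _ = pvBitsMSB 8 (n / 2^24) ++ (pvBitsMSB 8 (n / 2^16 % 256) ++ pvBitsMSB 16 (n % 2^16)) := by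
        rw [pv_bitsMSB_split 8 16 _ _ h2]
    _ = pvBitsMSB 8 (n / 2^24) ++ (pvBitsMSB 8 (n / 2^16 % 256)
          ++ pvBitsMSB (8 + 8) ((n / 2^8 % 256) * 2^8 + n % 2^8)) := by rw [← e3]
    _ = pvBitsMSB 8 (n / 2^24) ++ (pvBitsMSB 8 (n / 2^16 % 256)
          ++ (pvBitsMSB 8 (n / 2^8 % 256) ++ pvBitsMSB 8 (n % 2^8))) := by
        rw [pv_bitsMSB_split 8 8 _ _ h3]
    _ = _ := by simp [List.append_assoc]

-- the doubling-built table holds exactly the per-byte MSB renderings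
theorem pv_ook_table : pvOOK = (List.range 256).map (fun b => pvBitsMSB 8 b) := by
  set_option maxRecDepth 16384 in decide

theorem pv_ook_getD (b : Nat) (hb : b < 256) : pvOOK.getD b [] = pvBitsMSB 8 b := by
  rw [pv_ook_table]
  rw [List.getD_eq_getElem _ _ (by simpa using hb)]
  simp

-- B's byte index: for 0 ≤ frame, ((frame >>> s) & 0xFF).toNat = frame.toNat / 2^s % 256
theorem pv_byte_index (n : Nat) (s : Nat) :
    (PySem.Int.band (((n:Int)) >>> s) 0xFF).toNat = n / 2^s % 256 := by
  have hsh : ((n:Int)) >>> s = ((n >>> s : Nat) : Int) := by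
    simp [Int.shiftRight_eq_div_pow, Nat.shiftRight_eq_div_pow]
  rw [hsh, show ((0xFF:Int)) = ((255:Nat):Int) by norm_num, PySem.Int.band_natCast,
    Int.toNat_natCast]
  have : (n >>> s) &&& 255 = (n >>> s) % 256 := by
    have := Nat.and_two_pow_sub_one_eq_mod (n >>> s) 8
    norm_num at this
    exact this
  rw [this, Nat.shiftRight_eq_div_pow]

-- ===== VERDICT (by name: the statement is the Claim_ definition above) =====
theorem encode_touchtunes_spec : Claim_equal_encode_touchtunes := by
  intro command pin _
  show encode_touchtunes command pin = encode_touchtunes_alt command pin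
  unfold encode_touchtunes encode_touchtunes_alt
  dsimp only
  rw [pv_pin_loop, pv_ook_fold, pv_iterate_ook, List.nil_append,
    pv_specBody_bits 32 _ le_rfl, pv_body_bits]
  -- name the unmasked frame and its masked Nat value
  set X : Int := PySem.Int.bor
    (PySem.Int.bor ((PySem.Int.bor 0x5D00 (pvRev8 pin)) <<< (16:Nat)) (command <<< (8:Nat)))
    (PySem.Int.bxor command 0xFF) with hX
  have hmm : PySem.Int.band X 0xFFFFFFFF = X % 2^32 := by
    have h := pv_band_mask X 32
    norm_num at h ⊢
    exact h
  set n : Nat := (PySem.Int.band X 0xFFFFFFFF).toNat with hn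
  have hn32 : n < 2^32 := by
    have h1 : (0:Int) ≤ X % 2^32 := Int.emod_nonneg X (by positivity)
    have h2 : X % 2^32 < 2^32 := Int.emod_lt_of_pos X (by positivity)
    rw [hn, hmm]; omega
  have hframe : PySem.Int.band X 0xFFFFFFFF = ((n:Int)) := by
    rw [hn, hmm, Int.toNat_of_nonneg (Int.emod_nonneg X (by positivity)), ← hmm]
  rw [hframe]
  simp only [List.foldl_cons, List.foldl_nil, List.nil_append]
  rw [pv_byte_index n 24, pv_byte_index n 16, pv_byte_index n 8, pv_byte_index n 0]
  rw [pv_ook_getD _ (by omega), pv_ook_getD _ (by omega), pv_ook_getD _ (by omega),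
    pv_ook_getD _ (by omega)]
  rw [pv_bitsMSB_bytes n hn32]
  have h24 : n / 2^24 % 256 = n / 2^24 := by omega
  have h0 : n / 2^0 % 256 = n % 256 := by omega
  rw [h24, h0]
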